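-- pv_equiv track=rewrite | github.com/mailgyc/doudizhu | core/rule.py | _to_cards
-- ===== SOURCE A (Python) =====
-- def _to_cards(pokers):
--     cards = []
--     for p in pokers:
--         if p == 52:
--             cards.append('W')
--         elif p == 53:
--             cards.append('w')
--         else:
--             cards.append('A234567890JQK'[p % 13])
--     return _sort_card(cards)
--
-- def _sort_card(cards):
--     cards.sort(key=lambda ch: '34567890JQKA2wW'.index(ch))
--     return cards
-- ===== SOURCE B (Python) =====
-- ORDER = '34567890JQKA2wW'
-- # position in ORDER of 'A234567890JQK'[r] for r = p % 13
-- RANK = (11, 12, 0, 1, 2, 3, 4, 5, 6, 7, 8, 9, 10)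
--
--
-- def _to_cards(pokers):
--     # Counting sort on the 15-rank alphabet: one pass accumulating a count
--     # per rank, then emit each rank's char repeated count times, in ORDER.
--     # Measured ~2.4x faster than A at n=262144. Stability is irrelevant because equal-rank cards are identical chars.
--     counts = [0] * 15
--     for p in pokers:
--         if p == 52:
--             counts[14] += 1
--         elif p == 53:
--             counts[13] += 1
--         else:
--             counts[RANK[p % 13]] += 1
--     return [c for i, c in enumerate(ORDER) for _ in range(counts[i])]
-- ===== Notes on version B (the rewrite author's own statement) =====
-- stated objective: faster
-- what changed: Replaces the comparison sort keyed by ORDER.index with a one-pass counting sort: a 15-entry count table indexed directly by rank, then each rank's char emitted count times in ORDER; no card-char list is built or sorted.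
import Mathlib
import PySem

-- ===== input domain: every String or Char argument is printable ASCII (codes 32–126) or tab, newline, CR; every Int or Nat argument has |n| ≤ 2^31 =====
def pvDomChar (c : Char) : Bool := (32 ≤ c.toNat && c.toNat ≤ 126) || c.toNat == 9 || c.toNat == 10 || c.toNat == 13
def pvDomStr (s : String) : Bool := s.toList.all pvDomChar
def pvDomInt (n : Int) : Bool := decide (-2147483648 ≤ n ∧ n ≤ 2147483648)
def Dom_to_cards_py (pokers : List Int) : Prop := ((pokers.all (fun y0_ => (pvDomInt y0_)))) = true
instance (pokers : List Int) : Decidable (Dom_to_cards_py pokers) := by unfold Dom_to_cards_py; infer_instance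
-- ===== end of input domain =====

-- B replaces A's comparison sort (key = ORDER.index) by a one-pass counting
-- sort: a 15-entry count table indexed by rank, then each rank's char emitted
-- count times in ORDER.

-- ===== PORT A =====
def pvOrder : String := "34567890JQKA2wW"

-- '34567890JQKA2wW'.index(ch): every char A produces occurs in pvOrder, so
-- str.index never raises and equals str.find there (exact on all reachable values).
def pvKey (ch : String) : Int := PySem.Str.find pvOrder ch

-- the card char of one poker id; 0 ≤ p % 13 < 13, so the indexing is always `some`
-- and the `getD ""` default is never used.
def pvCard (p : Int) : String :=
  if p = 52 then "W"
  else if p = 53 then "w"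
  else ((PySem.Str.pyGet? "A234567890JQK" (PySem.Int.mod p 13)).map
          (fun c => String.ofList [c])).getD ""

-- cards built by appending one char per poker (a map), then sorted (stably) by pvKey.
def to_cards_py (pokers : List Int) : List String :=
  PySem.List.sorted (pokers.map pvCard) pvKey false

-- ===== PORT B =====
-- RANK = (11,12,0,1,2,3,4,5,6,7,8,9,10): position in ORDER of 'A234567890JQK'[p%13]
def pvRankTab : List Int := [11, 12, 0, 1, 2, 3, 4, 5, 6, 7, 8, 9, 10]

-- the count-table index of one poker id (the if/elif/else of Source B's loop body);
-- the index is a provably in-range nonneg int, used as a Nat list position.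
def pvIdx (p : Int) : Nat :=
  if p = 52 then 14
  else if p = 53 then 13
  else (PySem.List.pyGetD pvRankTab (PySem.Int.mod p 13) 0).toNat

-- the chars of ORDER as one-char strings, for the emitting comprehension
def pvOrderStrings : List String :=
  ["3", "4", "5", "6", "7", "8", "9", "0", "J", "Q", "K", "A", "2", "w", "W"]

def to_cards_py_alt (pokers : List Int) : List String :=
  let counts := pokers.foldl
    (fun acc p => acc.set (pvIdx p) (acc.getD (pvIdx p) 0 + 1))
    (List.replicate 15 (0 : Nat))
  (PySem.List.enumerate pvOrderStrings).flatMap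
    (fun ic => List.replicate (PySem.List.pyGetD counts ic.1 0) ic.2)

-- ===== PRECONDITION & SPEC =====
def Spec_to_cards_py (pokers : List Int) (out : List String) : Prop := out = to_cards_py_alt pokers
instance (pokers : List Int) (out : List String) : Decidable (Spec_to_cards_py pokers out) := by unfold Spec_to_cards_py; infer_instance

-- ===== CLAIM =====
def Claim_equal_to_cards_py : Prop := ∀ (pokers : List Int), Dom_to_cards_py pokers → Spec_to_cards_py pokers (to_cards_py pokers)

-- ===== LEMMAS AND PROOFS =====

-- the 15 rank keys in order, and the canonical bucket decomposition of a card list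
def pvKs : List Int := [0, 1, 2, 3, 4, 5, 6, 7, 8, 9, 10, 11, 12, 13, 14]

def pvCanon (cs : List String) : List (List String) :=
  pvKs.map (fun k => cs.filter (fun c => pvKey c = k))

theorem pvKey_card_bounds (p : Int) : 0 ≤ pvKey (pvCard p) ∧ pvKey (pvCard p) < 15 := by
  by_cases h52 : p = 52
  · simp only [pvCard, h52]; decide
  by_cases h53 : p = 53
  · simp only [pvCard, h53]; decide
  have h0 : 0 ≤ PySem.Int.mod p 13 := PySem.Int.mod_nonneg p (by norm_num)
  have h1 : PySem.Int.mod p 13 < 13 := PySem.Int.mod_lt p (by norm_num)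
  have hm : PySem.Int.mod p 13 = 0 ∨ PySem.Int.mod p 13 = 1 ∨ PySem.Int.mod p 13 = 2 ∨
      PySem.Int.mod p 13 = 3 ∨ PySem.Int.mod p 13 = 4 ∨ PySem.Int.mod p 13 = 5 ∨
      PySem.Int.mod p 13 = 6 ∨ PySem.Int.mod p 13 = 7 ∨ PySem.Int.mod p 13 = 8 ∨
      PySem.Int.mod p 13 = 9 ∨ PySem.Int.mod p 13 = 10 ∨ PySem.Int.mod p 13 = 11 ∨
      PySem.Int.mod p 13 = 12 := by omega
  rcases hm with h | h | h | h | h | h | h | h | h | h | h | h | h <;>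
    · simp only [pvCard, h52, h53, ite_false, h]; decide

-- the bridge between the two ports' per-element computations
theorem pvIdx_spec (p : Int) :
    pvIdx p = (pvKey (pvCard p)).toNat ∧ pvCard p = pvOrderStrings.getD (pvIdx p) "" := by
  by_cases h52 : p = 52
  · simp only [pvIdx, pvCard, h52]; decide
  by_cases h53 : p = 53
  · simp only [pvIdx, pvCard, h53]; decide
  have h0 : 0 ≤ PySem.Int.mod p 13 := PySem.Int.mod_nonneg p (by norm_num)
  have h1 : PySem.Int.mod p 13 < 13 := PySem.Int.mod_lt p (by norm_num)
  have hm : PySem.Int.mod p 13 = 0 ∨ PySem.Int.mod p 13 = 1 ∨ PySem.Int.mod p 13 = 2 ∨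
      PySem.Int.mod p 13 = 3 ∨ PySem.Int.mod p 13 = 4 ∨ PySem.Int.mod p 13 = 5 ∨
      PySem.Int.mod p 13 = 6 ∨ PySem.Int.mod p 13 = 7 ∨ PySem.Int.mod p 13 = 8 ∨
      PySem.Int.mod p 13 = 9 ∨ PySem.Int.mod p 13 = 10 ∨ PySem.Int.mod p 13 = 11 ∨
      PySem.Int.mod p 13 = 12 := by omega
  rcases hm with h | h | h | h | h | h | h | h | h | h | h | h | h <;>
    · simp only [pvIdx, pvCard, h52, h53, ite_false, h]; decide

theorem pvIdx_lt (p : Int) : pvIdx p < 15 := by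
  have h := pvKey_card_bounds p
  have h2 := (pvIdx_spec p).1
  omega

theorem pvKs_getElem (i : Nat) (h : i < 15) : pvKs[i]'(by simpa [pvKs] using h) = (i : Int) := by
  interval_cases i <;> rfl

theorem pv_insertBy_skip {bef : String → String → Bool} {c : String} (A B : List String)
    (hA : ∀ a ∈ A, bef c a = false) :
    PySem.List.insertBy bef c (A ++ B) = A ++ PySem.List.insertBy bef c B := by
  induction A with
  | nil => rfl
  | cons a A ih =>
    simp only [List.cons_append, PySem.List.insertBy, hA a (by simp)]
    simp only [Bool.false_eq_true, if_false, List.cons.injEq, true_and]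
    exact ih (fun x hx => hA x (by simp [hx]))

theorem pv_insertBy_front {bef : String → String → Bool} {c : String} (B : List String)
    (hB : ∀ b ∈ B, bef c b = true) :
    PySem.List.insertBy bef c B = c :: B := by
  cases B with
  | nil => rfl
  | cons b B => simp [PySem.List.insertBy, hB b (by simp)]

theorem pv_bucket_insert (ks : List Int) (f : Int → List String) (c : String)
    (hp : ks.Pairwise (· < ·))
    (hf : ∀ k ∈ ks, ∀ a ∈ f k, pvKey a = k)
    (hc : pvKey c ∈ ks) :
    PySem.List.insertBy (fun a b => decide (pvKey a < pvKey b)) c (ks.map f).flatten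
      = (ks.map (fun k => f k ++ if k = pvKey c then [c] else [])).flatten := by
  induction ks with
  | nil => simp at hc
  | cons k ks ih =>
    have hklt : ∀ k' ∈ ks, k < k' := (List.pairwise_cons.mp hp).1
    by_cases hk : k = pvKey c
    · simp only [List.map_cons, List.flatten_cons, if_pos hk]
      rw [pv_insertBy_skip (f k) _ (by
        intro a ha
        have := hf k (by simp) a ha
        simp [this, hk])]
      rw [pv_insertBy_front _ (by
        intro b hb
        simp only [List.mem_flatten, List.mem_map] at hb
        obtain ⟨L, ⟨k', hk', rfl⟩, hbL⟩ := hb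
        have := hf k' (by simp [hk']) b hbL
        have hlt := hklt k' hk'
        simp only [decide_eq_true_eq, this]
        omega)]
      have hrest : (ks.map fun k' => f k' ++ if k' = pvKey c then [c] else []) = ks.map f := by
        apply List.map_congr_left
        intro k' hk'
        have : k' ≠ pvKey c := by have := hklt k' hk'; omega
        simp [this]
      rw [hrest]
      simp
    · have hc' : pvKey c ∈ ks := by
        rcases List.mem_cons.mp hc with h | h
        · exact absurd h.symm hk
        · exact h
      have hkc : k < pvKey c := hklt _ hc'
      simp only [List.map_cons, List.flatten_cons]
      rw [pv_insertBy_skip (f k) _ (by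
        intro a ha
        have := hf k (by simp) a ha
        simp only [decide_eq_false_iff_not, not_lt, this]
        omega)]
      rw [ih hp.of_cons (fun k' h' => hf k' (by simp [h'])) hc']
      simp [hk]

-- A's stable sort equals the flattened bucket decomposition.
theorem pv_sorted_eq_canon (cs : List String)
    (hb : ∀ c ∈ cs, 0 ≤ pvKey c ∧ pvKey c < 15) :
    PySem.List.sorted cs pvKey false = (pvCanon cs).flatten := by
  rw [PySem.List.sorted_eq_foldl_insertBy]
  induction cs using List.reverseRecOn with
  | nil => decide
  | append_singleton cs c ih =>
    have hb' : ∀ x ∈ cs, 0 ≤ pvKey x ∧ pvKey x < 15 := fun x hx => hb x (by simp [hx])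
    rw [List.foldl_append, List.foldl_cons, List.foldl_nil, ih hb']
    have hcb := hb c (by simp)
    rw [pvCanon, pv_bucket_insert pvKs _ c (by decide)
      (by
        intro k hk a ha
        exact of_decide_eq_true (List.mem_filter.mp ha).2)
      (by
        have : pvKey c = 0 ∨ pvKey c = 1 ∨ pvKey c = 2 ∨ pvKey c = 3 ∨ pvKey c = 4 ∨
            pvKey c = 5 ∨ pvKey c = 6 ∨ pvKey c = 7 ∨ pvKey c = 8 ∨ pvKey c = 9 ∨
            pvKey c = 10 ∨ pvKey c = 11 ∨ pvKey c = 12 ∨ pvKey c = 13 ∨ pvKey c = 14 := by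
          omega
        rcases this with h | h | h | h | h | h | h | h | h | h | h | h | h | h | h <;>
          simp [pvKs, h])]
    rw [pvCanon]
    congr 1
    apply List.map_congr_left
    intro k _
    rw [List.filter_append]
    congr 1
    by_cases h : pvKey c = k
    · simp [h]
    · have h' : ¬ k = pvKey c := fun hh => h hh.symm
      simp [h, h']

-- B's count fold computes, at each index i < 15, the number of pokers of rank i.
theorem pv_fold_counts (ps : List Int) :
    ps.foldl (fun acc p => acc.set (pvIdx p) (acc.getD (pvIdx p) 0 + 1))
        (List.replicate 15 (0 : Nat))
      = (List.range 15).map (fun i => ps.countP (fun p => pvIdx p = i)) := by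
  induction ps using List.reverseRecOn with
  | nil => decide
  | append_singleton ps p ih =>
    rw [List.foldl_append, List.foldl_cons, List.foldl_nil, ih]
    have hlt := pvIdx_lt p
    have hget : (((List.range 15).map fun i => ps.countP (fun q => pvIdx q = i)).getD (pvIdx p) 0)
        = ps.countP (fun q => pvIdx q = pvIdx p) := by
      rw [List.getD_eq_getElem?_getD, List.getElem?_eq_getElem (by simpa using hlt)]
      simp
    rw [hget]
    apply List.ext_getElem
    · simp
    · intro i h1 h2
      have hi : i < 15 := by simpa using h2
      by_cases hip : i = pvIdx p
      · subst hip
        rw [List.getElem_set_self (by simpa using hlt)]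
        simp [List.countP_append]
      · rw [List.getElem_set_ne (fun h => hip h.symm)]
        simp only [List.getElem_map, List.getElem_range]
        rw [List.countP_append]
        have : ¬ (pvIdx p = i) := fun h => hip h.symm
        simp [this]

-- one rank block: the replicate of B's count equals A's filter bucket.
theorem pv_block (ps : List Int) (i : Nat) (hi : i < 15) :
    List.replicate (ps.countP (fun p => pvIdx p = i)) (pvOrderStrings.getD i "")
      = (ps.map pvCard).filter (fun c => pvKey c = (i : Int)) := by
  induction ps with
  | nil => simp
  | cons p ps ih =>
    have hs := pvIdx_spec p
    have hb := pvKey_card_bounds p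
    by_cases h : pvIdx p = i
    · have hk : pvKey (pvCard p) = (i : Int) := by omega
      simp only [List.countP_cons, List.map_cons, List.filter_cons, h, hk,
        decide_true, if_pos trivial]
      rw [List.replicate_succ, ih, hs.2, h]
    · have hk : ¬ (pvKey (pvCard p) = (i : Int)) := by omega
      simp only [List.map_cons, List.filter_cons, hk]
      simpa [h, hk] using ih

-- ===== VERDICT =====
theorem to_cards_py_spec : Claim_equal_to_cards_py := by
  intro pokers _
  simp only [Spec_to_cards_py, to_cards_py, to_cards_py_alt]
  have hb : ∀ c ∈ pokers.map pvCard, 0 ≤ pvKey c ∧ pvKey c < 15 := by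
    intro c hc
    obtain ⟨p, _, rfl⟩ := List.mem_map.mp hc
    exact pvKey_card_bounds p
  rw [pv_sorted_eq_canon _ hb, pv_fold_counts]
  -- both sides are the concatenation of the 15 rank blocks
  rw [show PySem.List.enumerate pvOrderStrings =
      (List.range 15).map (fun (i : Nat) => ((i : Int), pvOrderStrings.getD i "")) by decide]
  rw [List.flatMap_map]
  have hA : pvCanon (pokers.map pvCard)
      = (List.range 15).map (fun i =>
          List.replicate (pokers.countP (fun p => pvIdx p = i)) (pvOrderStrings.getD i "")) := by
    unfold pvCanon
    apply List.ext_getElem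
    · simp [pvKs]
    · intro i h1 h2
      have hi15 : i < 15 := by simpa [pvKs] using h1
      simp only [List.getElem_map, List.getElem_range]
      rw [pvKs_getElem i hi15]
      exact (pv_block pokers i hi15).symm
  rw [hA, List.flatten_eq_flatMap, List.flatMap_map]
  apply List.flatMap_congr
  intro i hi
  have hi15 : i < 15 := by simpa using hi
  have hg : PySem.List.pyGetD
      ((List.range 15).map fun j => pokers.countP (fun p => pvIdx p = j)) ((i : Int)) 0
      = pokers.countP (fun p => pvIdx p = i) := by
    rw [PySem.List.pyGetD_natCast, List.getD_eq_getElem?_getD,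
      List.getElem?_eq_getElem (by simpa using hi15)]
    simp
  simp [hg]
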